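-- pv_equiv track=rewrite | github.com/FiratUniversity-IJDP-SoftEng/discretemath-labs1-AYLIN-P-SAATLOU | ex-6.py | find_pseudoprimes
-- ===== SOURCE A (Python) =====
-- def is_prime(n):
--     """check if a number is prime"""
--     if n < 2:
--         return False
--     for i in range(2, n):
--         if n % i == 0:
--             return False
--     return True
--
-- def find_pseudoprimes(limit):
--     """Find all composite numbers n <= limit where 2^(n-1) ≡ 1 (mod n)"""
--     pseudoprimes = []
--
--     for n in range(2, limit + 1):
--         # Skip prime numbers (we only want composites)
--         if is_prime(n):
--             continue
--
--         # Check if 2^(n-1) ≡ 1 (mod n)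
--         # Using pow with modulus for efficiency
--         if pow(2, n-1, n) == 1:
--             pseudoprimes.append(n)
--
--     return pseudoprimes
-- ===== SOURCE B (Python) =====
-- def _modpow(b, e, m):
--     # binary (square-and-multiply) modular exponentiation
--     r = 1
--     b %= m
--     while e > 0:
--         if e & 1:
--             r = r * b % m
--         b = b * b % m
--         e >>= 1
--     return r
--
-- def _is_composite(n):
--     # trial division only up to the square root
--     i = 2
--     while i * i <= n:
--         if n % i == 0:
--             return True
--         i += 1
--     return False
--
-- def find_pseudoprimes(limit):
--     out = []
--     n = 2
--     while n <= limit: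
--         if _is_composite(n) and _modpow(2, n - 1, n) == 1:
--             out.append(n)
--         n += 1
--     return out
-- ===== Notes on version B (the rewrite author's own statement) =====
-- stated objective: faster
-- what changed: Replaces A's full trial division over range(2,n) for every n with divisor search only up to sqrt(n), and the builtin pow with an explicit square-and-multiply modular exponentiation, in a single while-loop that tests compositeness and the Fermat condition directly.
import Mathlib
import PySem

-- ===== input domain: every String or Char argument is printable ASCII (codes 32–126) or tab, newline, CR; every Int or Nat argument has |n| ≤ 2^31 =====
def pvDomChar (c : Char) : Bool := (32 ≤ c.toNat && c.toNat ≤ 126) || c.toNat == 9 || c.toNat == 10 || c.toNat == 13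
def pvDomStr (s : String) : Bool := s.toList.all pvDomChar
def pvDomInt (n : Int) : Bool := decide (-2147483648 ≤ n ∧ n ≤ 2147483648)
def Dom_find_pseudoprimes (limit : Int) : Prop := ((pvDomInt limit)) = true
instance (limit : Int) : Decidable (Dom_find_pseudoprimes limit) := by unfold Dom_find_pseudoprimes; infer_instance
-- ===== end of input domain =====

-- B replaces A's full trial division (range(2,n)) with divisor search up to sqrt(n)
-- and the builtin pow with explicit square-and-multiply modular exponentiation: asymptotically faster.


-- ===== PORT A =====
def is_prime (n : Int) : Bool :=
  if n < 2 then false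
  else (PySem.List.pyRange 2 n 1).all (fun i => decide (PySem.Int.mod n i ≠ 0))

def find_pseudoprimes (limit : Int) : List Int :=
  (PySem.List.pyRange 2 (limit + 1) 1).foldl
    (fun acc n =>
      if is_prime n then acc
      else if PySem.Int.mod ((2 : Int) ^ (n - 1).toNat) n == 1 then acc ++ [n] else acc)
    []

-- ===== PORT B =====
def modpowAux (b e m r : Int) : Int :=
  if h : 0 < e then
    modpowAux (PySem.Int.mod (b * b) m) (PySem.Int.floordiv e 2) m
      (if PySem.Int.mod e 2 == 1 then PySem.Int.mod (r * b) m else r)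
  else r
termination_by e.toNat
decreasing_by rw [PySem.Int.floordiv_eq_ediv_of_pos (by norm_num)]; omega

def modpow (b e m : Int) : Int := modpowAux (PySem.Int.mod b m) e m 1

def isCompositeAux (n i : Int) : Bool :=
  if h : i * i ≤ n then
    if PySem.Int.mod n i == 0 then true else isCompositeAux n (i + 1)
  else false
termination_by (n + 1 - i).toNat
decreasing_by
  have hin : i ≤ n := by nlinarith [mul_self_nonneg i]
  omega

def is_composite (n : Int) : Bool := isCompositeAux n 2

def altAux (limit n : Int) (acc : List Int) : List Int :=
  if n ≤ limit then
    altAux limit (n + 1)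
      (if is_composite n && (modpow 2 (n - 1) n == 1) then acc ++ [n] else acc)
  else acc
termination_by (limit + 1 - n).toNat

def find_pseudoprimes_alt (limit : Int) : List Int := altAux limit 2 []

-- ===== PRECONDITION & SPEC =====
def Spec_find_pseudoprimes (limit : Int) (out : List Int) : Prop := out = find_pseudoprimes_alt limit
instance (limit : Int) (out : List Int) : Decidable (Spec_find_pseudoprimes limit out) := by unfold Spec_find_pseudoprimes; infer_instance

-- ===== CLAIM (what is proved, stated in full; the proofs are below) =====
def Claim_equal_find_pseudoprimes : Prop := ∀ (limit : Int), Dom_find_pseudoprimes limit → Spec_find_pseudoprimes limit (find_pseudoprimes limit)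

-- ===== LEMMAS AND PROOFS =====

-- (a % n)^k % n = a^k % n
lemma pow_emod_aux (a n : Int) (k : Nat) : (a % n) ^ k % n = a ^ k % n := by
  induction k with
  | zero => simp
  | succ k ih =>
    rw [pow_succ, pow_succ, Int.mul_emod, ih, Int.emod_emod_of_dvd _ dvd_rfl, ← Int.mul_emod]

-- modpowAux computes r * b^e mod m for reduced arguments
lemma modpowAux_eq : ∀ (b e m r : Int), 0 < m → 0 ≤ b → b < m → 0 ≤ r → r < m →
      modpowAux b e m r = (r * b ^ e.toNat) % m := by
  intro b e m r
  induction b, e, r using modpowAux.induct m with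
  | case1 b e r h ih =>
    intro hm hb0 hbm hr0 hrm
    rw [modpowAux, dif_pos h]
    have h2 : (0 : Int) < 2 := by norm_num
    have hb'0 : 0 ≤ PySem.Int.mod (b * b) m := by
      rw [PySem.Int.mod_eq_emod_of_pos hm]; exact Int.emod_nonneg _ (ne_of_gt hm)
    have hb'm : PySem.Int.mod (b * b) m < m := by
      rw [PySem.Int.mod_eq_emod_of_pos hm]; exact Int.emod_lt_of_pos _ hm
    have hr'0 : 0 ≤ (if (PySem.Int.mod e 2 == 1) then PySem.Int.mod (r * b) m else r) := by
      split
      · rw [PySem.Int.mod_eq_emod_of_pos hm]; exact Int.emod_nonneg _ (ne_of_gt hm)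
      · exact hr0
    have hr'm : (if (PySem.Int.mod e 2 == 1) then PySem.Int.mod (r * b) m else r) < m := by
      split
      · rw [PySem.Int.mod_eq_emod_of_pos hm]; exact Int.emod_lt_of_pos _ hm
      · exact hrm
    simp only [dite_eq_ite] at ih
    rw [ih hm hb'0 hb'm hr'0 hr'm]
    simp only [PySem.Int.mod_eq_emod_of_pos hm, PySem.Int.mod_eq_emod_of_pos h2,
        PySem.Int.floordiv_eq_ediv_of_pos h2]
    have hdm : 2 * (e / 2) + e % 2 = e := by omega
    by_cases hpar : e % 2 = 1
    · rw [if_pos (by simp [hpar])]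
      have hk : e.toNat = 2 * (e / 2).toNat + 1 := by omega
      have hstep : (r * b % m * ((b * b) % m) ^ (e / 2).toNat) % m
          = (r * b * (b * b) ^ (e / 2).toNat) % m := by
        conv_lhs => rw [Int.mul_emod]
        rw [Int.emod_emod_of_dvd _ dvd_rfl, pow_emod_aux, ← Int.mul_emod]
      rw [hstep, hk]
      congr 1
      ring
    · rw [if_neg (by simp [hpar])]
      have hk : e.toNat = 2 * (e / 2).toNat := by omega
      have hstep : (r * ((b * b) % m) ^ (e / 2).toNat) % m
          = (r * (b * b) ^ (e / 2).toNat) % m := by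
        conv_lhs => rw [Int.mul_emod]
        rw [pow_emod_aux, ← Int.mul_emod]
      rw [hstep, hk]
      congr 1
      ring
  | case2 b e r h =>
    intro hm hb0 hbm hr0 hrm
    rw [modpowAux, dif_neg h]
    have he0 : e.toNat = 0 := by omega
    rw [he0, pow_zero, mul_one, Int.emod_eq_of_lt hr0 hrm]

lemma modpow_eq (e m : Int) (hm : 2 ≤ m) :
    modpow 2 e m = PySem.Int.mod ((2 : Int) ^ e.toNat) m := by
  have hm0 : (0 : Int) < m := by omega
  unfold modpow
  rw [PySem.Int.mod_eq_emod_of_pos hm0,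
      modpowAux_eq _ _ _ _ hm0 (Int.emod_nonneg _ (ne_of_gt hm0)) (Int.emod_lt_of_pos _ hm0)
        (by norm_num) (by omega),
      PySem.Int.mod_eq_emod_of_pos hm0, one_mul, pow_emod_aux]

-- trial division up to sqrt finds a divisor iff full trial division does
lemma isCompositeAux_iff (n : Int) :
    ∀ k : Int, 1 ≤ k →
      (isCompositeAux n k = true ↔ ∃ i, k ≤ i ∧ i * i ≤ n ∧ PySem.Int.mod n i = 0) := by
  intro k
  induction k using isCompositeAux.induct n with
  | case1 k hk hmod =>
    intro hk1
    rw [isCompositeAux, dif_pos hk, if_pos hmod]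
    simp only [true_iff]
    exact ⟨k, le_refl k, hk, by simpa using hmod⟩
  | case2 k hk hmod ih =>
    intro hk1
    rw [isCompositeAux, dif_pos hk, if_neg hmod]
    rw [ih (by omega)]
    constructor
    · rintro ⟨i, hi1, hi2, hi3⟩
      exact ⟨i, by omega, hi2, hi3⟩
    · rintro ⟨i, hi1, hi2, hi3⟩
      refine ⟨i, ?_, hi2, hi3⟩
      rcases lt_or_eq_of_le hi1 with h | h
      · omega
      · exfalso; exact hmod (by rw [h]; simp [hi3])
  | case3 k hk =>
    intro hk1
    rw [isCompositeAux, dif_neg hk]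
    simp only [Bool.false_eq_true, false_iff]
    rintro ⟨i, hi1, hi2, hi3⟩
    have : k * k ≤ i * i := by nlinarith
    omega

-- a number ≥ 2 with a divisor in [2, n) has one with i*i ≤ n, and conversely
lemma divisor_sqrt_iff (n : Int) (h2 : 2 ≤ n) :
    (∃ i, 2 ≤ i ∧ i < n ∧ n % i = 0) ↔ (∃ i, 2 ≤ i ∧ i * i ≤ n ∧ n % i = 0) := by
  constructor
  · rintro ⟨i, hi1, hi2, hi3⟩
    obtain ⟨j, hj⟩ : i ∣ n := Int.dvd_of_emod_eq_zero hi3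
    have hj2 : 2 ≤ j := by nlinarith
    by_cases hii : i * i ≤ n
    · exact ⟨i, hi1, hii, hi3⟩
    · refine ⟨j, hj2, by nlinarith, Int.emod_eq_zero_of_dvd ⟨i, by linarith [hj]; ⟩⟩
  · rintro ⟨i, hi1, hi2, hi3⟩
    exact ⟨i, hi1, by nlinarith, hi3⟩

lemma prime_comp (n : Int) (h2 : 2 ≤ n) : is_prime n = !is_composite n := by
  have hall : is_prime n = true ↔ ∀ i, 2 ≤ i → i < n → ¬ PySem.Int.mod n i = 0 := by
    rw [is_prime, if_neg (by omega)]
    simp [List.all_eq_true, PySem.List.mem_pyRange_one, and_imp]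
  have hcomp : is_composite n = true ↔ ∃ i, 2 ≤ i ∧ i * i ≤ n ∧ PySem.Int.mod n i = 0 :=
    isCompositeAux_iff n 2 (by omega)
  have hmm : ∀ i : Int, 2 ≤ i → PySem.Int.mod n i = n % i := fun i hi =>
    PySem.Int.mod_eq_emod_of_pos (by omega)
  cases hc : is_composite n
  · simp only [Bool.not_false]
    rw [hall]
    intro i hi1 hi2 hmod
    have : is_composite n = true := by
      rw [hcomp]
      obtain ⟨i', h1, h2', h3⟩ := (divisor_sqrt_iff n h2).mp ⟨i, hi1, hi2, by rw [← hmm i hi1]; exact hmod⟩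
      exact ⟨i', h1, h2', by rw [hmm i' h1]; exact h3⟩
    rw [hc] at this; exact Bool.false_ne_true this
  · simp only [Bool.not_true]
    rw [Bool.eq_false_iff]
    intro hp
    obtain ⟨i, hi1, hi2, hi3⟩ := hcomp.mp hc
    obtain ⟨i', h1', h2', h3'⟩ := (divisor_sqrt_iff n h2).mpr ⟨i, hi1, hi2, by rw [← hmm i hi1]; exact hi3⟩
    exact hall.mp hp i' h1' h2' (by rw [hmm i' h1']; exact h3')

lemma altAux_eq (limit : Int) :
    ∀ n acc, altAux limit n acc =
      acc ++ (PySem.List.pyRange n (limit + 1) 1).filter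
        (fun n => is_composite n && (modpow 2 (n - 1) n == 1)) := by
  intro n acc
  induction n, acc using altAux.induct limit with
  | case1 n acc h ih =>
    simp only [dite_eq_ite] at ih
    have hcons : PySem.List.pyRange n (limit + 1) 1 = n :: PySem.List.pyRange (n + 1) (limit + 1) 1 :=
      PySem.List.pyRange_one_cons (by omega)
    rw [altAux, if_pos h, ih, hcons, List.filter_cons]
    cases hp : (is_composite n && (modpow 2 (n - 1) n == 1)) with
    | true =>
      simp only [if_true, List.append_assoc, List.singleton_append]
    | false =>
      simp only [Bool.false_eq_true, if_false]
  | case2 n acc h =>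
    rw [altAux, if_neg h, PySem.List.pyRange_one_eq_nil (by omega), List.filter_nil,
        List.append_nil]

-- ===== VERDICT (by name: the statement is the Claim_ definition above) =====
theorem find_pseudoprimes_spec : Claim_equal_find_pseudoprimes := by
  intro limit _
  show find_pseudoprimes limit = find_pseudoprimes_alt limit
  rw [find_pseudoprimes, find_pseudoprimes_alt, altAux_eq, List.nil_append]
  rw [PySem.List.foldl_congr_mem _ _
      (fun acc n => if (!is_prime n && (PySem.Int.mod ((2 : Int) ^ (n - 1).toNat) n == 1))
        then acc ++ [n] else acc) _
      (fun acc n _ => by cases hp : is_prime n <;> simp [hp])]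
  rw [PySem.List.foldl_append_if_eq_filter
      (fun n => !is_prime n && (PySem.Int.mod ((2 : Int) ^ (n - 1).toNat) n == 1)),
      List.nil_append]
  apply List.filter_congr
  intro n hn
  have h2 : 2 ≤ n := ((PySem.List.mem_pyRange_one).mp hn).1
  rw [prime_comp n h2, Bool.not_not, modpow_eq (n - 1) n h2]
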